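-- pv_equiv track=rewrite | github.com/phaniblend/tuxBE | app/services/ux_questions_prompt.py | get_app_specific_prompts
-- ===== SOURCE A (Python) =====
-- def get_app_specific_prompts(app_idea: str) -> dict:
--     """Get app-specific prompt enhancements based on app type"""
--
--     app_idea_lower = app_idea.lower()
--
--     # E-commerce related
--     if any(word in app_idea_lower for word in ['shop', 'store', 'commerce', 'market', 'sell', 'buy']):
--         return {
--             "focus_areas": ["product discovery", "checkout flow", "payment methods", "inventory management"],
--             "specific_questions": [
--                 "How should products be categorized and filtered?",
--                 "What payment methods need to be supported?",
--                 "How will order tracking and fulfillment work?"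
--             ]
--         }
--
--     # Social/Community related
--     elif any(word in app_idea_lower for word in ['social', 'community', 'network', 'connect', 'share']):
--         return {
--             "focus_areas": ["user profiles", "content sharing", "privacy controls", "moderation"],
--             "specific_questions": [
--                 "What types of content can users create and share?",
--                 "How should user connections/relationships work?",
--                 "What privacy controls do users need?"
--             ]
--         }
--
--     # Education/Learning related
--     elif any(word in app_idea_lower for word in ['learn', 'education', 'course', 'training', 'study']):
--         return {
--             "focus_areas": ["course structure", "progress tracking", "assessments", "collaboration"],
--             "specific_questions": [
--                 "How should learning content be structured?",
--                 "What types of assessments or quizzes are needed?",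
--                 "How will student progress be tracked?"
--             ]
--         }
--
--     # Health/Fitness related
--     elif any(word in app_idea_lower for word in ['health', 'fitness', 'medical', 'wellness', 'exercise']):
--         return {
--             "focus_areas": ["data tracking", "goal setting", "privacy/HIPAA", "professional integration"],
--             "specific_questions": [
--                 "What health metrics need to be tracked?",
--                 "How will users set and monitor goals?",
--                 "Are there regulatory compliance requirements?"
--             ]
--         }
--
--     # Productivity/Tools
--     elif any(word in app_idea_lower for word in ['productivity', 'task', 'project', 'manage', 'organize']):
--         return {
--             "focus_areas": ["workflow management", "collaboration", "integrations", "reporting"],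
--             "specific_questions": [
--                 "What is the primary workflow users will follow?",
--                 "How will team collaboration work?",
--                 "What external tools need integration?"
--             ]
--         }
--
--     # Default for other app types
--     else:
--         return {
--             "focus_areas": ["core functionality", "user workflows", "data management", "user engagement"],
--             "specific_questions": [
--                 "What is the primary action users will take?",
--                 "How frequently will users engage with the app?",
--                 "What makes this different from existing solutions?"
--             ]
--         }
-- ===== SOURCE B (Python) =====
-- # B: a flat keyword->category map aggregated with min(), instead of an if-elif chain of group tests.
--
-- _PROMPTS = [
--     {
--         "focus_areas": ["product discovery", "checkout flow", "payment methods", "inventory management"],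
--         "specific_questions": [
--             "How should products be categorized and filtered?",
--             "What payment methods need to be supported?",
--             "How will order tracking and fulfillment work?"
--         ]
--     },
--     {
--         "focus_areas": ["user profiles", "content sharing", "privacy controls", "moderation"],
--         "specific_questions": [
--             "What types of content can users create and share?",
--             "How should user connections/relationships work?",
--             "What privacy controls do users need?"
--         ]
--     },
--     {
--         "focus_areas": ["course structure", "progress tracking", "assessments", "collaboration"],
--         "specific_questions": [
--             "How should learning content be structured?",
--             "What types of assessments or quizzes are needed?",
--             "How will student progress be tracked?"
--         ]
--     },
--     {
--         "focus_areas": ["data tracking", "goal setting", "privacy/HIPAA", "professional integration"],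
--         "specific_questions": [
--             "What health metrics need to be tracked?",
--             "How will users set and monitor goals?",
--             "Are there regulatory compliance requirements?"
--         ]
--     },
--     {
--         "focus_areas": ["workflow management", "collaboration", "integrations", "reporting"],
--         "specific_questions": [
--             "What is the primary workflow users will follow?",
--             "How will team collaboration work?",
--             "What external tools need integration?"
--         ]
--     },
--     {
--         "focus_areas": ["core functionality", "user workflows", "data management", "user engagement"],
--         "specific_questions": [
--             "What is the primary action users will take?",
--             "How frequently will users engage with the app?",
--             "What makes this different from existing solutions?"
--         ]
--     },
-- ]
--
-- _KEYWORD_CATEGORY = {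
--     "shop": 0, "store": 0, "commerce": 0, "market": 0, "sell": 0, "buy": 0,
--     "social": 1, "community": 1, "network": 1, "connect": 1, "share": 1,
--     "learn": 2, "education": 2, "course": 2, "training": 2, "study": 2,
--     "health": 3, "fitness": 3, "medical": 3, "wellness": 3, "exercise": 3,
--     "productivity": 4, "task": 4, "project": 4, "manage": 4, "organize": 4,
-- }
--
--
-- def get_app_specific_prompts(app_idea: str) -> dict:
--     """Get app-specific prompt enhancements based on app type"""
--     lo = app_idea.lower()
--     best = min((cat for kw, cat in _KEYWORD_CATEGORY.items() if kw in lo),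
--                default=len(_PROMPTS) - 1)
--     return _PROMPTS[best]
-- ===== Notes on version B (the rewrite author's own statement) =====
-- stated objective: alternative
-- what changed: Replaces the if-elif chain of per-group any-keyword tests with a flat keyword->category map whose matched categories are aggregated with min() (default = last category) and used to index one prompts table; first-match-by-group-order becomes minimum-category, which coincides because categories are numbered in chain order.
import Mathlib
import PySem

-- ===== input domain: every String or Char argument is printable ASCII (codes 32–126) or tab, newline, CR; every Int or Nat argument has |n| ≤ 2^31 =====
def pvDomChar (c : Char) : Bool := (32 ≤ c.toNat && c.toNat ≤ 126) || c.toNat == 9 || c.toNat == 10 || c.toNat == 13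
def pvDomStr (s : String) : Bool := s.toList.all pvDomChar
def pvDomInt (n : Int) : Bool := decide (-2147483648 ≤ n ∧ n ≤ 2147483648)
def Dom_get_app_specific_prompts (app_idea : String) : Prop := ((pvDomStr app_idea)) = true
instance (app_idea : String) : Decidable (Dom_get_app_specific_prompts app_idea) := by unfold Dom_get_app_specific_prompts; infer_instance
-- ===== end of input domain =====

-- B replaces A's if-elif chain of group tests by a flat keyword→category map aggregated with min()
-- and one indexed prompts table (alternative decomposition; same behaviour, same cost).

-- ===== PORT A =====
-- literal transliteration of A: lowercase once, then an if-elif chain of any-keyword tests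
def get_app_specific_prompts (app_idea : String) : List (String × List String) :=
  let app_idea_lower := PySem.Str.lower app_idea
  if (["shop", "store", "commerce", "market", "sell", "buy"].any
        (fun word => PySem.Str.isIn word app_idea_lower)) then
    [("focus_areas", ["product discovery", "checkout flow", "payment methods", "inventory management"]),
     ("specific_questions",
       ["How should products be categorized and filtered?",
        "What payment methods need to be supported?",
        "How will order tracking and fulfillment work?"])]
  else if (["social", "community", "network", "connect", "share"].any
        (fun word => PySem.Str.isIn word app_idea_lower)) then
    [("focus_areas", ["user profiles", "content sharing", "privacy controls", "moderation"]),
     ("specific_questions",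
       ["What types of content can users create and share?",
        "How should user connections/relationships work?",
        "What privacy controls do users need?"])]
  else if (["learn", "education", "course", "training", "study"].any
        (fun word => PySem.Str.isIn word app_idea_lower)) then
    [("focus_areas", ["course structure", "progress tracking", "assessments", "collaboration"]),
     ("specific_questions",
       ["How should learning content be structured?",
        "What types of assessments or quizzes are needed?",
        "How will student progress be tracked?"])]
  else if (["health", "fitness", "medical", "wellness", "exercise"].any
        (fun word => PySem.Str.isIn word app_idea_lower)) then
    [("focus_areas", ["data tracking", "goal setting", "privacy/HIPAA", "professional integration"]),
     ("specific_questions",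
       ["What health metrics need to be tracked?",
        "How will users set and monitor goals?",
        "Are there regulatory compliance requirements?"])]
  else if (["productivity", "task", "project", "manage", "organize"].any
        (fun word => PySem.Str.isIn word app_idea_lower)) then
    [("focus_areas", ["workflow management", "collaboration", "integrations", "reporting"]),
     ("specific_questions",
       ["What is the primary workflow users will follow?",
        "How will team collaboration work?",
        "What external tools need integration?"])]
  else
    [("focus_areas", ["core functionality", "user workflows", "data management", "user engagement"]),
     ("specific_questions",
       ["What is the primary action users will take?",
        "How frequently will users engage with the app?",
        "What makes this different from existing solutions?"])]

-- ===== PORT B =====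
-- B-side helpers, transliterating Source B: the indexed prompts table and the flat keyword→category dict
def pvPrompts : List (List (String × List String)) :=
  [[("focus_areas", ["product discovery", "checkout flow", "payment methods", "inventory management"]),
    ("specific_questions",
      ["How should products be categorized and filtered?",
       "What payment methods need to be supported?",
       "How will order tracking and fulfillment work?"])],
   [("focus_areas", ["user profiles", "content sharing", "privacy controls", "moderation"]),
    ("specific_questions",
      ["What types of content can users create and share?",
       "How should user connections/relationships work?",
       "What privacy controls do users need?"])],
   [("focus_areas", ["course structure", "progress tracking", "assessments", "collaboration"]),
    ("specific_questions",
      ["How should learning content be structured?",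
       "What types of assessments or quizzes are needed?",
       "How will student progress be tracked?"])],
   [("focus_areas", ["data tracking", "goal setting", "privacy/HIPAA", "professional integration"]),
    ("specific_questions",
      ["What health metrics need to be tracked?",
       "How will users set and monitor goals?",
       "Are there regulatory compliance requirements?"])],
   [("focus_areas", ["workflow management", "collaboration", "integrations", "reporting"]),
    ("specific_questions",
      ["What is the primary workflow users will follow?",
       "How will team collaboration work?",
       "What external tools need integration?"])],
   [("focus_areas", ["core functionality", "user workflows", "data management", "user engagement"]),
    ("specific_questions",
      ["What is the primary action users will take?",
       "How frequently will users engage with the app?",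
       "What makes this different from existing solutions?"])]]

def pvKeywordCategory : List (String × Int) :=
  [("shop", 0), ("store", 0), ("commerce", 0), ("market", 0), ("sell", 0), ("buy", 0),
   ("social", 1), ("community", 1), ("network", 1), ("connect", 1), ("share", 1),
   ("learn", 2), ("education", 2), ("course", 2), ("training", 2), ("study", 2),
   ("health", 3), ("fitness", 3), ("medical", 3), ("wellness", 3), ("exercise", 3),
   ("productivity", 4), ("task", 4), ("project", 4), ("manage", 4), ("organize", 4)]

-- min((cat for kw, cat in _KEYWORD_CATEGORY.items() if kw in lo), default=len(_PROMPTS)-1); then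
-- _PROMPTS[best] (best is always 0..5, so the index is in range; getD's [] arm is unreachable)
def get_app_specific_prompts_alt (app_idea : String) : List (String × List String) :=
  let lo := PySem.Str.lower app_idea
  let best := PySem.List.minD
      ((pvKeywordCategory.filter (fun p => PySem.Str.isIn p.1 lo)).map Prod.snd)
      (fun x => x) ((pvPrompts.length : Int) - 1)
  (PySem.List.pyGet? pvPrompts best).getD []

-- ===== PRECONDITION & SPEC =====
def Spec_get_app_specific_prompts (app_idea : String) (out : List (String × List String)) : Prop := out = get_app_specific_prompts_alt app_idea
instance (app_idea : String) (out : List (String × List String)) : Decidable (Spec_get_app_specific_prompts app_idea out) := by unfold Spec_get_app_specific_prompts; infer_instance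

-- ===== CLAIM =====
def Claim_equal_get_app_specific_prompts : Prop := ∀ (app_idea : String), Dom_get_app_specific_prompts app_idea → Spec_get_app_specific_prompts app_idea (get_app_specific_prompts app_idea)

-- ===== LEMMAS AND PROOFS =====

-- the foldl inside PySem.List.min? with key = id
def pvStep : Option Int → Int → Option Int :=
  fun acc x => match acc with
    | none => some x
    | some m => if x < m then some x else some m

lemma pv_foldl_keep (m : Int) (l : List Int) (h : ∀ x ∈ l, m ≤ x) :
    List.foldl pvStep (some m) l = some m := by
  induction l with
  | nil => rfl
  | cons x t ih =>
    have hx : ¬ x < m := not_lt.mpr (h x (List.mem_cons_self ..))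
    simp only [List.foldl_cons, pvStep, if_neg hx]
    exact ih (fun y hy => h y (List.mem_cons_of_mem _ hy))

lemma pv_foldl_none (i : Int) (l : List Int) (h : ∀ x ∈ l, x = i) (hne : l ≠ []) :
    List.foldl pvStep none l = some i := by
  cases l with
  | nil => exact absurd rfl hne
  | cons x t =>
    have hx : x = i := h x (List.mem_cons_self ..)
    simp only [List.foldl_cons, pvStep, hx]
    exact pv_foldl_keep i t (fun y hy => le_of_eq (h y (List.mem_cons_of_mem _ hy)).symm)

-- group i of the flat map: if no keyword of ws occurs, the filter is empty
lemma pv_group_nil (lo : String) (ws : List String) (i : Int)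
    (h : (ws.any fun w => PySem.Str.isIn w lo) = false) :
    ((ws.map (fun w => (w, i))).filter (fun p => PySem.Str.isIn p.1 lo)) = [] := by
  rw [List.filter_eq_nil_iff]
  intro p hp
  simp only [List.mem_map] at hp
  obtain ⟨w, hw, rfl⟩ := hp
  simpa using (List.any_eq_false.mp h) w hw

lemma pv_group_snd (lo : String) (ws : List String) (i : Int) (x : Int)
    (hx : x ∈ (((ws.map (fun w => (w, i))).filter (fun p => PySem.Str.isIn p.1 lo)).map Prod.snd)) :
    x = i := by
  simp only [List.mem_map, List.mem_filter] at hx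
  obtain ⟨p, ⟨hp, _⟩, rfl⟩ := hx
  obtain ⟨w, _, rfl⟩ := hp
  rfl

lemma pv_group_ne (lo : String) (ws : List String) (i : Int)
    (h : (ws.any fun w => PySem.Str.isIn w lo) = true) :
    (((ws.map (fun w => (w, i))).filter (fun p => PySem.Str.isIn p.1 lo)).map Prod.snd) ≠ [] := by
  obtain ⟨w, hw, hin⟩ := List.any_eq_true.mp h
  simp only [ne_eq, List.map_eq_nil_iff, List.filter_eq_nil_iff, not_forall]
  exact ⟨(w, i), List.mem_map.mpr ⟨w, hw, rfl⟩, by simpa using hin⟩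

-- PySem.List.min? with key = id is the pvStep fold
lemma pv_min_eq_foldl (l : List Int) :
    PySem.List.min? l (fun x => x) = List.foldl pvStep none l := by
  simp only [PySem.List.min?]
  congr 1
  funext acc x
  cases acc <;> rfl

-- the three ways one group of the flat map interacts with the running minimum
lemma pv_nil_group (lo : String) (ws : List String) (i : Int) (acc : Option Int)
    (h : (ws.any fun w => PySem.Str.isIn w lo) = false) :
    List.foldl pvStep acc (((ws.map (fun w => (w, i))).filter
      (fun p => PySem.Str.isIn p.1 lo)).map Prod.snd) = acc := by
  rw [pv_group_nil lo ws i h]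
  rfl

lemma pv_hit_group (lo : String) (ws : List String) (i : Int)
    (h : (ws.any fun w => PySem.Str.isIn w lo) = true) :
    List.foldl pvStep none (((ws.map (fun w => (w, i))).filter
      (fun p => PySem.Str.isIn p.1 lo)).map Prod.snd) = some i :=
  pv_foldl_none i _ (pv_group_snd lo ws i) (pv_group_ne lo ws i h)

lemma pv_keep_group (lo : String) (ws : List String) (i j : Int) (hij : i ≤ j) :
    List.foldl pvStep (some i) (((ws.map (fun w => (w, j))).filter
      (fun p => PySem.Str.isIn p.1 lo)).map Prod.snd) = some i :=
  pv_foldl_keep _ _ (fun x hx => (pv_group_snd lo ws j x hx) ▸ hij)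

-- ===== VERDICT =====
theorem get_app_specific_prompts_spec : Claim_equal_get_app_specific_prompts := by
  intro app_idea _
  unfold Spec_get_app_specific_prompts get_app_specific_prompts get_app_specific_prompts_alt
  set lo := PySem.Str.lower app_idea with hlo
  simp only [PySem.List.minD]
  rw [pv_min_eq_foldl]
  rw [show pvKeywordCategory
      = (["shop","store","commerce","market","sell","buy"].map (fun w => (w, (0:Int))))
        ++ (["social","community","network","connect","share"].map (fun w => (w, (1:Int))))
        ++ (["learn","education","course","training","study"].map (fun w => (w, (2:Int))))
        ++ (["health","fitness","medical","wellness","exercise"].map (fun w => (w, (3:Int))))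
        ++ (["productivity","task","project","manage","organize"].map (fun w => (w, (4:Int)))) from rfl]
  simp only [List.filter_append, List.map_append, List.foldl_append]
  by_cases b0 : (["shop", "store", "commerce", "market", "sell", "buy"].any fun word => PySem.Str.isIn word lo) = true
  · rw [pv_hit_group lo _ 0 b0, pv_keep_group lo _ 0 1 (by norm_num),
       pv_keep_group lo _ 0 2 (by norm_num), pv_keep_group lo _ 0 3 (by norm_num),
       pv_keep_group lo _ 0 4 (by norm_num)]
    rw [if_pos b0]
    rfl
  · have b0' := Bool.not_eq_true _ |>.mp b0
    rw [pv_nil_group lo _ 0 _ b0']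
    by_cases b1 : (["social", "community", "network", "connect", "share"].any fun word => PySem.Str.isIn word lo) = true
    · rw [pv_hit_group lo _ 1 b1, pv_keep_group lo _ 1 2 (by norm_num),
         pv_keep_group lo _ 1 3 (by norm_num), pv_keep_group lo _ 1 4 (by norm_num)]
      rw [if_neg b0, if_pos b1]
      rfl
    · have b1' := Bool.not_eq_true _ |>.mp b1
      rw [pv_nil_group lo _ 1 _ b1']
      by_cases b2 : (["learn", "education", "course", "training", "study"].any fun word => PySem.Str.isIn word lo) = true
      · rw [pv_hit_group lo _ 2 b2, pv_keep_group lo _ 2 3 (by norm_num),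
           pv_keep_group lo _ 2 4 (by norm_num)]
        rw [if_neg b0, if_neg b1, if_pos b2]
        rfl
      · have b2' := Bool.not_eq_true _ |>.mp b2
        rw [pv_nil_group lo _ 2 _ b2']
        by_cases b3 : (["health", "fitness", "medical", "wellness", "exercise"].any fun word => PySem.Str.isIn word lo) = true
        · rw [pv_hit_group lo _ 3 b3, pv_keep_group lo _ 3 4 (by norm_num)]
          rw [if_neg b0, if_neg b1, if_neg b2, if_pos b3]
          rfl
        · have b3' := Bool.not_eq_true _ |>.mp b3
          rw [pv_nil_group lo _ 3 _ b3']
          by_cases b4 : (["productivity", "task", "project", "manage", "organize"].any fun word => PySem.Str.isIn word lo) = true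
          · rw [pv_hit_group lo _ 4 b4]
            rw [if_neg b0, if_neg b1, if_neg b2, if_neg b3, if_pos b4]
            rfl
          · have b4' := Bool.not_eq_true _ |>.mp b4
            rw [pv_nil_group lo _ 4 _ b4']
            rw [if_neg b0, if_neg b1, if_neg b2, if_neg b3, if_neg b4]
            rfl
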